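-- pv_equiv track=rewrite | github.com/striantafyllis/djlibman | general_utils.py | duplicate_positions
-- ===== SOURCE A (Python) =====
-- def duplicate_positions(iterable):
--     already_seen_values = set()
--
--     positions = []
--
--     for i, value in enumerate(iterable):
--         if value in already_seen_values:
--             positions.append(i)
--         else:
--             already_seen_values.add(value)
--
--     assert len(positions) == len(iterable) - len(already_seen_values)
--
--     return positions
-- ===== SOURCE B (Python) =====
-- def duplicate_positions(iterable):
--     groups = {}
--     for i, value in enumerate(iterable):
--         groups.setdefault(value, []).append(i)
--     return sorted(i for idxs in groups.values() for i in idxs[1:])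
-- ===== Notes on version B (the rewrite author's own statement) =====
-- stated objective: alternative
-- what changed: Instead of one incremental pass with a seen-set, B first groups all positions by value in a dict (value -> list of indices), then pools every index except the first of each group and sorts the pooled indices ascending.
import Mathlib
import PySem

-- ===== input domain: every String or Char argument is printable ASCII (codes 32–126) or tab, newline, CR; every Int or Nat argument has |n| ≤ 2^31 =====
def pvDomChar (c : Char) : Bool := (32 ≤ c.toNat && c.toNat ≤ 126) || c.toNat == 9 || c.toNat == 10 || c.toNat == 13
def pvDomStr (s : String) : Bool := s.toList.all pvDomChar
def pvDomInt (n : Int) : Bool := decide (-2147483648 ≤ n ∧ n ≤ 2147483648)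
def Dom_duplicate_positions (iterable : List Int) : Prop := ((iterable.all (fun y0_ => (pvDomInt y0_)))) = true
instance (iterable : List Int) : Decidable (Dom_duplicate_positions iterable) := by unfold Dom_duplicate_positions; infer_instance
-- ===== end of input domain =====

-- B groups positions by value in a dict, pools every non-first index per group, and sorts;
-- A makes one incremental pass with a seen-set. Proved equal on all inputs (alternative decomposition, no speed claim).


-- ===== PORT A =====
-- literal port of A; A's assert always holds on lists (len bookkeeping), so it is a no-op here
def duplicate_positions (iterable : List Int) : List Int :=
  ((PySem.List.enumerate iterable 0).foldl
    (fun (st : PySem.Set Int × List Int) (p : Int × Int) =>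
      if PySem.Set.contains st.1 p.2 then (st.1, st.2 ++ [p.1])
      else (PySem.Set.add st.1 p.2, st.2))
    ((PySem.Set.empty : PySem.Set Int), ([] : List Int))).2

-- ===== PORT B =====
def duplicate_positions_alt (iterable : List Int) : List Int :=
  let groups : PySem.Dict Int (List Int) :=
    (PySem.List.enumerate iterable 0).foldl
      (fun d p => d.modify p.2 [] (fun g => g ++ [p.1])) PySem.Dict.empty
  PySem.List.sorted (groups.values.flatMap (fun g => g.drop 1)) (fun i => i)

-- ===== PRECONDITION & SPEC =====
def Spec_duplicate_positions (iterable : List Int) (out : List Int) : Prop := out = duplicate_positions_alt iterable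
instance (iterable : List Int) (out : List Int) : Decidable (Spec_duplicate_positions iterable out) := by unfold Spec_duplicate_positions; infer_instance

-- ===== CLAIM (what is proved, stated in full; the proofs are below) =====
def Claim_equal_duplicate_positions : Prop := ∀ (iterable : List Int), Dom_duplicate_positions iterable → Spec_duplicate_positions iterable (duplicate_positions iterable)

-- ===== LEMMAS AND PROOFS =====

-- positions (indices) at which value k occurs in xs, in order
def occIdx (xs : List Int) (k : Int) : List Int :=
  ((PySem.List.enumerate xs 0).filter (fun p => p.2 == k)).map (·.1)

-- the pooled non-first indices, grouped by first occurrence of each distinct value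
def pool (xs : List Int) : List Int :=
  (PySem.Set.ofList xs).flatMap (fun k => (occIdx xs k).drop 1)

lemma enum_map_snd (xs : List Int) (s : Int) :
    (PySem.List.enumerate xs s).map (·.2) = xs := by
  induction xs generalizing s with
  | nil => simp [PySem.List.enumerate]
  | cons x t ih => rw [PySem.List.enumerate_cons]; simp [ih]

lemma foldA_fst (l : List (Int × Int)) (s : PySem.Set Int) (acc : List Int) :
    (l.foldl
      (fun (st : PySem.Set Int × List Int) (p : Int × Int) =>
        if PySem.Set.contains st.1 p.2 then (st.1, st.2 ++ [p.1])
        else (PySem.Set.add st.1 p.2, st.2)) (s, acc)).1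
      = PySem.Set.update s (l.map (·.2)) := by
  induction l generalizing s acc with
  | nil => simp [PySem.Set.update]
  | cons p t ih =>
      simp only [List.foldl_cons, List.map_cons, PySem.Set.update_cons]
      by_cases h : p.2 ∈ s
      · rw [if_pos ((PySem.Set.contains_iff s p.2).mpr h)]
        rw [PySem.Set.add_of_mem h]; exact ih s _
      · rw [if_neg (by simp [h])]; exact ih _ _

lemma A_snoc (xs : List Int) (v : Int) :
    duplicate_positions (xs ++ [v]) =
      if v ∈ xs then duplicate_positions xs ++ [(xs.length : Int)] else duplicate_positions xs := by
  unfold duplicate_positions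
  rw [PySem.List.enumerate_append, List.foldl_append]
  have hfst := foldA_fst (PySem.List.enumerate xs 0) PySem.Set.empty []
  rw [enum_map_snd] at hfst
  rw [PySem.List.enumerate_cons]
  simp only [PySem.List.enumerate, List.foldl_cons, List.foldl_nil]
  rw [hfst, PySem.Set.update_empty]
  by_cases h : v ∈ xs
  · rw [if_pos ((PySem.Set.contains_iff _ v).mpr ((PySem.Set.mem_ofList xs v).mpr h)), if_pos h]
    simp
  · rw [if_neg (by simp [PySem.Set.mem_ofList, h]), if_neg h]

lemma occIdx_snoc (xs : List Int) (v k : Int) :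
    occIdx (xs ++ [v]) k = occIdx xs k ++ (if v == k then [(xs.length : Int)] else []) := by
  unfold occIdx
  rw [PySem.List.enumerate_append, List.filter_append, List.map_append, PySem.List.enumerate_cons]
  simp only [PySem.List.enumerate, List.filter]
  by_cases h : v == k
  · simp [h]
  · simp [h]

lemma occIdx_nil_of_not_mem (xs : List Int) (v : Int) (h : v ∉ xs) : occIdx xs v = [] := by
  unfold occIdx
  rw [List.map_eq_nil_iff, List.filter_eq_nil_iff]
  intro p hp hpk
  exact h (by
    have : p.2 ∈ (PySem.List.enumerate xs 0).map (·.2) := List.mem_map_of_mem hp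
    rw [enum_map_snd] at this
    simpa [eq_of_beq hpk] using this)

lemma occIdx_ne_nil_of_mem (xs : List Int) (v : Int) (h : v ∈ xs) : occIdx xs v ≠ [] := by
  intro hnil
  unfold occIdx at hnil
  rw [List.map_eq_nil_iff, List.filter_eq_nil_iff] at hnil
  have : v ∈ (PySem.List.enumerate xs 0).map (·.2) := by rw [enum_map_snd]; exact h
  obtain ⟨p, hp, hpv⟩ := List.mem_map.mp this
  exact absurd (by simp [hpv]) (hnil p hp)

lemma flatMap_append_perm {α β : Type} (l : List α) (f g : α → List β) :
    (l.flatMap (fun x => f x ++ g x)).Perm (l.flatMap f ++ l.flatMap g) := by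
  induction l with
  | nil => simp
  | cons x t ih =>
      simp only [List.flatMap_cons]
      refine (ih.append_left (f x ++ g x)).trans ?_
      simp only [List.append_assoc]
      exact (List.perm_append_comm_assoc (g x) (t.flatMap f) (t.flatMap g)).append_left (f x)

lemma flatMap_if_nil {n : Int} (S : List Int) (v : Int) (h : v ∉ S) :
    (S.flatMap (fun k => if v == k then [n] else [])) = [] := by
  induction S with
  | nil => simp
  | cons k t ih =>
      simp only [List.flatMap_cons]
      rw [if_neg (by simp_all), ih (by simp_all)]
      simp

lemma flatMap_if_single {n : Int} (S : List Int) (hS : S.Nodup) (v : Int) (hv : v ∈ S) :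
    (S.flatMap (fun k => if v == k then [n] else [])) = [n] := by
  induction S with
  | nil => simp at hv
  | cons k t ih =>
      simp only [List.flatMap_cons]
      by_cases h : v = k
      · subst h
        rw [if_pos (by simp), flatMap_if_nil t v (by simp_all)]
        simp
      · rw [if_neg (by simp [h])]
        simp only [List.nil_append]
        exact ih (List.Nodup.of_cons hS) (by simp_all)

lemma main_invariant (xs : List Int) :
    (duplicate_positions xs).Pairwise (· < ·) ∧
    (∀ i ∈ duplicate_positions xs, i < (xs.length : Int)) ∧
    (pool xs).Perm (duplicate_positions xs) := by
  induction xs using List.reverseRecOn with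
  | nil => refine ⟨by decide, by decide, by decide⟩
  | append_singleton xs v ih =>
      obtain ⟨hpw, hbd, hperm⟩ := ih
      rw [A_snoc]
      have hS : (PySem.Set.ofList xs).Nodup := PySem.Set.nodup_ofList xs
      by_cases h : v ∈ xs
      · rw [if_pos h]
        have hpool : (pool (xs ++ [v])).Perm (pool xs ++ [(xs.length : Int)]) := by
          unfold pool
          rw [PySem.Set.ofList_append_singleton,
              PySem.Set.add_of_mem ((PySem.Set.mem_ofList xs v).mpr h)]
          have hcong : (PySem.Set.ofList xs).flatMap (fun k => (occIdx (xs ++ [v]) k).drop 1)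
              = (PySem.Set.ofList xs).flatMap
                  (fun k => (occIdx xs k).drop 1 ++ (if v == k then [(xs.length : Int)] else [])) := by
            apply List.flatMap_congr
            intro k hk
            rw [occIdx_snoc]
            by_cases hvk : v == k
            · rw [List.drop_append_of_le_length]
              have : k ∈ xs := (PySem.Set.mem_ofList xs k).mp hk
              have := occIdx_ne_nil_of_mem xs k this
              cases hocc : occIdx xs k with
              | nil => exact absurd hocc this
              | cons a t => simp
            · simp [hvk]
          rw [hcong]
          refine (flatMap_append_perm _ _ _).trans ?_
          rw [flatMap_if_single _ hS v ((PySem.Set.mem_ofList xs v).mpr h)]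
        refine ⟨?_, ?_, ?_⟩
        · rw [List.pairwise_append]
          refine ⟨hpw, List.pairwise_singleton _ _, ?_⟩
          intro a ha b hb
          simp only [List.mem_singleton] at hb
          subst hb
          exact hbd a ha
        · intro i hi
          rcases List.mem_append.mp hi with hi | hi
          · have := hbd i hi; simp only [List.length_append, List.length_cons,
              List.length_nil]; push_cast; omega
          · simp only [List.mem_singleton] at hi; subst hi
            simp only [List.length_append, List.length_cons, List.length_nil]; push_cast; omega
        · exact hpool.trans (hperm.append_right _)
      · rw [if_neg h]
        have hpool : pool (xs ++ [v]) = pool xs := by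
          unfold pool
          rw [PySem.Set.ofList_append_singleton,
              PySem.Set.add_of_not_mem (by rw [PySem.Set.mem_ofList]; exact h),
              List.flatMap_append]
          have h2 : ([v].flatMap (fun k => (occIdx (xs ++ [v]) k).drop 1)) = [] := by
            simp only [List.flatMap_cons, List.flatMap_nil, List.append_nil]
            rw [occIdx_snoc, occIdx_nil_of_not_mem xs v h]
            simp
          rw [h2, List.append_nil]
          apply List.flatMap_congr
          intro k hk
          have hkx : k ∈ xs := (PySem.Set.mem_ofList xs k).mp hk
          have hkv : ¬ (v == k) := by
            simp only [beq_iff_eq]; rintro rfl; exact h hkx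
          rw [occIdx_snoc, if_neg hkv, List.append_nil]
        refine ⟨hpw, ?_, by rw [hpool]; exact hperm⟩
        intro i hi
        have := hbd i hi
        simp only [List.length_append, List.length_cons, List.length_nil]; push_cast; omega

lemma B_groups_flat (xs : List Int) :
    (((PySem.List.enumerate xs 0).foldl
        (fun (d : PySem.Dict Int (List Int)) p => d.modify p.2 [] (fun g => g ++ [p.1]))
        PySem.Dict.empty).values.flatMap (fun g => g.drop 1)) = pool xs := by
  set l := PySem.List.enumerate xs 0 with hl
  set d := l.foldl (fun (d : PySem.Dict Int (List Int)) p => d.modify p.2 [] (fun g => g ++ [p.1]))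
      PySem.Dict.empty with hd
  have hkeys : d.keys = PySem.Set.ofList xs := by
    rw [hd, PySem.Dict.keys_foldl_modify_key l (fun p => p.2) [] (fun _ p => (fun g => g ++ [p.1]))]
    rw [PySem.Dict.keys_empty, PySem.Set.update_nil_left, enum_map_snd]
  have hnd : d.keys.Nodup := by
    rw [hkeys]; exact PySem.Set.nodup_ofList xs
  have hgetD : ∀ k, d.getD k [] = occIdx xs k := by
    intro k
    have hswap : d = (l.map Prod.swap).foldl
        (fun (d : PySem.Dict Int (List Int)) q => d.modify q.1 [] (fun g => g ++ [q.2]))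
        PySem.Dict.empty := by
      rw [hd, List.foldl_map]
      rfl
    rw [hswap, PySem.Dict.getD_foldl_modify_append]
    rw [PySem.Dict.getD_empty, List.nil_append]
    unfold occIdx
    rw [List.filter_map]
    rw [List.map_map]
    rfl
  have hvals : d.values = d.keys.map (fun k => d.getD k []) := by
    unfold PySem.Dict.values
    rw [PySem.Dict.items_eq_map_keys d hnd [], List.map_map]
    rfl
  rw [hvals, List.flatMap_map, hkeys]
  unfold pool
  apply List.flatMap_congr
  intro k _
  rw [hgetD]

-- ===== VERDICT (by name: the statement is the Claim_ definition above) =====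
theorem duplicate_positions_spec : Claim_equal_duplicate_positions := by
  intro xs _
  unfold Spec_duplicate_positions duplicate_positions_alt
  obtain ⟨hpw, _, hperm⟩ := main_invariant xs
  simp only []
  rw [B_groups_flat]
  exact (PySem.List.sorted_eq_of_perm_of_pairwise_lt (pool xs) (duplicate_positions xs)
    (fun i => i) hperm.symm (by simpa using hpw)).symm
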